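-- pv_equiv track=rewrite | github.com/ObserverPoa/Baekjoon-Algorithms | Baekjoon Online Judge/2504/2504.py | solution
-- ===== SOURCE A (Python) =====
-- brackets = {
--     ')': ('(', 2),
--     ']': ('[', 3),
-- }
--
-- opening_brackets = set(
--     map(lambda x: x[0], brackets.values())
-- )
--
-- def solution(bracket_str):
--     stack = []
--     bracket_calc_results = []
--     depth = 0
--
--     for char in bracket_str:
--         if char in opening_brackets:
--             depth += 1
--             stack.append(char)
--         elif char in brackets and stack:
--             current_bracket = stack.pop()
--             opening_bracket, value = brackets[char]
--             if current_bracket != opening_bracket: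
--                 return 0
--
--             depth -= 1
--
--             if bracket_calc_results:
--                 result, result_depth = bracket_calc_results.pop()
--                 if depth == result_depth:
--                     bracket_calc_results.append([result + value, depth])
--                 elif depth == result_depth - 1:
--                     if bracket_calc_results and bracket_calc_results[-1][1] == depth:
--                         bracket_calc_results[-1][0] += result * value
--                     else:
--                         bracket_calc_results.append([result * value, depth])
--                 else:
--                     bracket_calc_results.append([result, result_depth])
--                     bracket_calc_results.append([value, depth])
--             else:
--                 bracket_calc_results.append([value, depth])
--         else:
--             return 0
--
--     if stack:
--         return 0
--     else:
--         return sum(map(lambda x: x[0], bracket_calc_results))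
-- ===== SOURCE B (Python) =====
-- def solution(bracket_str):
--     # stack of (opening_char, partial_sum_of_completed_children); scalar total for depth 0
--     stack = []
--     total = 0
--     for char in bracket_str:
--         if char == '(' or char == '[':
--             stack.append((char, 0))
--         elif char == ')' or char == ']':
--             if not stack:
--                 return 0
--             opener, s = stack.pop()
--             if opener != ('(' if char == ')' else '['):
--                 return 0
--             w = 2 if char == ')' else 3
--             v = w if s == 0 else w * s
--             if stack:
--                 oc, os = stack[-1]
--                 stack[-1] = (oc, os + v)
--             else:
--                 total += v
--         else:
--             return 0
--     if stack:
--         return 0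
--     return total
-- ===== Notes on version B (the rewrite author's own statement) =====
-- stated objective: simpler
-- what changed: Replaced A's depth-tagged list of partial results with its 4-way merge logic by a single stack of (opener, partial sum) pairs: closing a bracket folds its value into the enclosing frame in O(1), no separate depth counter or final summation pass.
import Mathlib
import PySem

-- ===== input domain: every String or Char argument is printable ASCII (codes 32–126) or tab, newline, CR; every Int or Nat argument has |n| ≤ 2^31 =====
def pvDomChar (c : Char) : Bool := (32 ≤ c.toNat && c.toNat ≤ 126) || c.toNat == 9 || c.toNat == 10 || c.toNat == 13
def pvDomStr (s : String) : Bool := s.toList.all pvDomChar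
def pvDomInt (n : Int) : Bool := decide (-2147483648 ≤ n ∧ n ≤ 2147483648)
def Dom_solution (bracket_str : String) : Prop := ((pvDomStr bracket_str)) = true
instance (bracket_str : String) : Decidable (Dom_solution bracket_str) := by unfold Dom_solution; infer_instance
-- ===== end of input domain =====

-- B is simpler: one stack of (opener, partial sum) pairs instead of A's char stack + depth counter + depth-tagged results list.

-- ===== PORT A =====
-- state: stack (head = top), bracket_calc_results (head = last appended), depth
def solveA : List Char → List Char → List (Int × Int) → Int → Int
  | [], stack, results, _ =>
      if stack ≠ [] then 0 else (results.map Prod.fst).sum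
  | c :: cs, stack, results, depth =>
      if c = '(' ∨ c = '[' then
        solveA cs (c :: stack) results (depth + 1)
      else if (c = ')' ∨ c = ']') ∧ stack ≠ [] then
        match stack with
        | [] => 0
        | cur :: rest =>
          let opening : Char := if c = ')' then '(' else '['
          let value : Int := if c = ')' then 2 else 3
          if cur ≠ opening then 0
          else
            let depth' := depth - 1
            match results with
            | [] => solveA cs rest [(value, depth')] depth'
            | (result, rdepth) :: rrest =>
              if depth' = rdepth then
                solveA cs rest ((result + value, depth') :: rrest) depth'
              else if depth' = rdepth - 1 then
                match rrest with
                | (r2, d2) :: rr2 =>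
                  if d2 = depth' then
                    solveA cs rest ((r2 + result * value, d2) :: rr2) depth'
                  else
                    solveA cs rest ((result * value, depth') :: (r2, d2) :: rr2) depth'
                | [] => solveA cs rest [(result * value, depth')] depth'
              else
                solveA cs rest ((value, depth') :: (result, rdepth) :: rrest) depth'
      else 0

def solution (bracket_str : String) : Int :=
  solveA bracket_str.toList [] [] 0

-- ===== PORT B =====
-- state: stack of (opener, partial sum) pairs (head = top), running total for depth 0
def solveB : List Char → List (Char × Int) → Int → Int
  | [], stack, total => if stack ≠ [] then 0 else total
  | c :: cs, stack, total =>
      if c = '(' ∨ c = '[' then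
        solveB cs ((c, 0) :: stack) total
      else if c = ')' ∨ c = ']' then
        match stack with
        | [] => 0
        | (opener, s) :: rest =>
          if opener ≠ (if c = ')' then '(' else '[') then 0
          else
            let w : Int := if c = ')' then 2 else 3
            let v : Int := if s = 0 then w else w * s
            match rest with
            | [] => solveB cs [] (total + v)
            | (oc, os) :: rest2 => solveB cs ((oc, os + v) :: rest2) total
      else 0

def solution_alt (bracket_str : String) : Int :=
  solveB bracket_str.toList [] 0

-- ===== PRECONDITION & SPEC =====
def Spec_solution (bracket_str : String) (out : Int) : Prop := out = solution_alt bracket_str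
instance (bracket_str : String) (out : Int) : Decidable (Spec_solution bracket_str out) := by unfold Spec_solution; infer_instance

-- ===== CLAIM (what is proved, stated in full; the proofs are below) =====
def Claim_equal_solution : Prop := ∀ (bracket_str : String), Dom_solution bracket_str → Spec_solution bracket_str (solution bracket_str)

-- ===== LEMMAS AND PROOFS =====

-- A's results list, reconstructed from B's state: one (sum, enclosing depth) entry
-- per nonzero pending sum, deepest first.
def resultsOf : List (Char × Int) → Int → List (Int × Int)
  | [], total => if total ≠ 0 then [(total, 0)] else []
  | (_, s) :: rest, total =>
      (if s ≠ 0 then [((s : Int), (rest.length : Int) + 1)] else []) ++ resultsOf rest total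

theorem resultsOf_bound (bs : List (Char × Int)) (t : Int) :
    ∀ x ∈ resultsOf bs t, 0 ≤ x.2 ∧ x.2 ≤ (bs.length : Int) := by
  induction bs with
  | nil =>
      intro x hx
      simp only [resultsOf] at hx
      split at hx <;> simp_all
  | cons p rest ih =>
      intro x hx
      obtain ⟨c, s⟩ := p
      simp only [resultsOf, List.mem_append] at hx
      rcases hx with hx | hx
      · split at hx <;> simp_all
        omega
      · have := ih x hx
        simp only [List.length_cons]
        push_cast
        omega

-- the invariant relating A's state to B's state
def InvAB (stack : List Char) (results : List (Int × Int)) (depth : Int)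
    (bstack : List (Char × Int)) (total : Int) : Prop :=
  stack = bstack.map Prod.fst ∧ depth = (bstack.length : Int) ∧
  results = resultsOf bstack total ∧ 0 ≤ total ∧ (∀ p ∈ bstack, 0 ≤ p.2)

-- A's processing of a matched closing bracket of weight w, after the pop
def closeA (cs : List Char) (rest : List Char) (results : List (Int × Int))
    (depth' w : Int) : Int :=
  match results with
  | [] => solveA cs rest [(w, depth')] depth'
  | (result, rdepth) :: rrest =>
    if depth' = rdepth then solveA cs rest ((result + w, depth') :: rrest) depth'
    else if depth' = rdepth - 1 then
      match rrest with
      | (r2, d2) :: rr2 =>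
        if d2 = depth' then solveA cs rest ((r2 + result * w, d2) :: rr2) depth'
        else solveA cs rest ((result * w, depth') :: (r2, d2) :: rr2) depth'
      | [] => solveA cs rest [(result * w, depth')] depth'
    else solveA cs rest ((w, depth') :: (result, rdepth) :: rrest) depth'

-- B's processing of a matched closing bracket of weight w, after the pop
def closeB (cs : List Char) (rest : List (Char × Int)) (w s total : Int) : Int :=
  let v : Int := if s = 0 then w else w * s
  match rest with
  | [] => solveB cs [] (total + v)
  | (oc, os) :: rest2 => solveB cs ((oc, os + v) :: rest2) total

theorem solveA_close (cs : List Char) (cur : Char) (rest : List Char)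
    (results : List (Int × Int)) (depth : Int) (c och : Char) (w : Int)
    (hc : (c = ')' ∧ och = '(' ∧ w = 2) ∨ (c = ']' ∧ och = '[' ∧ w = 3)) :
    solveA (c :: cs) (cur :: rest) results depth =
      if cur = och then closeA cs rest results (depth - 1) w else 0 := by
  rcases hc with ⟨rfl, rfl, rfl⟩ | ⟨rfl, rfl, rfl⟩
  · simp only [solveA, closeA]
    norm_num [show ¬((')' : Char) = '(') from by decide, show ¬((')' : Char) = '[') from by decide,
      show ¬((')' : Char) = ']') from by decide]
    exact fun h => absurd h (by simp)
  · simp only [solveA, closeA]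
    norm_num [show ¬((']' : Char) = '(') from by decide, show ¬((']' : Char) = '[') from by decide,
      show ¬((']' : Char) = ')') from by decide]
    exact fun h => absurd h (by simp)

theorem solveB_close (cs : List Char) (op : Char) (s : Int) (rest : List (Char × Int))
    (total : Int) (c och : Char) (w : Int)
    (hc : (c = ')' ∧ och = '(' ∧ w = 2) ∨ (c = ']' ∧ och = '[' ∧ w = 3)) :
    solveB (c :: cs) ((op, s) :: rest) total =
      if op = och then closeB cs rest w s total else 0 := by
  rcases hc with ⟨rfl, rfl, rfl⟩ | ⟨rfl, rfl, rfl⟩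
  · simp only [solveB, closeB]
    norm_num [show ¬((')' : Char) = '(') from by decide, show ¬((')' : Char) = '[') from by decide,
      show ¬((')' : Char) = ']') from by decide]
  · simp only [solveB, closeB]
    norm_num [show ¬((']' : Char) = '(') from by decide, show ¬((']' : Char) = '[') from by decide,
      show ¬((']' : Char) = ')') from by decide]

-- the heart of the equivalence: one matched close preserves the simulation
theorem close_key (cs : List Char) (rest : List (Char × Int)) (total s w : Int)
    (hw : 0 < w) (hs : 0 ≤ s) (ht : 0 ≤ total) (hr : ∀ p ∈ rest, 0 ≤ p.2)
    (ih : ∀ (bstack : List (Char × Int)) (total' : Int) (stack : List Char)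
        (results : List (Int × Int)) (depth : Int),
        InvAB stack results depth bstack total' →
        solveA cs stack results depth = solveB cs bstack total') :
    closeA cs (rest.map Prod.fst)
      ((if s ≠ 0 then [((s : Int), (rest.length : Int) + 1)] else []) ++ resultsOf rest total)
      (rest.length : Int) w
    = closeB cs rest w s total := by
  by_cases hsz : s = 0
  · subst hsz
    simp only [ne_eq, not_true_eq_false, if_neg, false_and, ite_false, reduceIte,
      List.nil_append, closeB, if_pos rfl]
    cases rest with
    | nil =>
        by_cases ht0 : total = 0
        · subst ht0
          simp only [resultsOf, ne_eq, not_true_eq_false, reduceIte, closeA]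
          apply ih [] (0 + w)
          refine ⟨rfl, by simp, ?_, by omega, by simp⟩
          simp only [resultsOf]
          rw [if_pos (by omega : (0 : Int) + w ≠ 0)]
          simp
        · simp only [resultsOf, ne_eq, ht0, not_false_eq_true, if_pos, reduceIte, closeA,
            List.length_nil, Nat.cast_zero, if_pos rfl]
          apply ih [] (total + w)
          refine ⟨rfl, by simp, ?_, by omega, by simp⟩
          simp only [resultsOf]
          rw [if_pos (by omega : total + w ≠ 0)]
    | cons q rest2 =>
        obtain ⟨oc, os⟩ := q
        have hos : 0 ≤ os := hr (oc, os) (by simp)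
        have hr2 : ∀ p ∈ rest2, 0 ≤ p.2 := fun p hp => hr p (by simp [hp])
        by_cases hosz : os = 0
        · subst hosz
          simp only [resultsOf, ne_eq, not_true_eq_false, reduceIte, List.nil_append]
          cases hres : resultsOf rest2 total with
          | nil =>
              simp only [closeA]
              apply ih ((oc, 0 + w) :: rest2) total
              refine ⟨by simp, by simp, ?_, ht, ?_⟩
              · simp only [resultsOf]
                rw [if_pos (by omega : (0 : Int) + w ≠ 0), hres]
                simp
              · intro p hp
                rcases List.mem_cons.mp hp with h | h
                · simp [h]; omega
                · exact hr2 p h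
          | cons r rrest =>
              obtain ⟨rv, rd⟩ := r
              have hb := resultsOf_bound rest2 total (rv, rd) (by rw [hres]; simp)
              simp only at hb
              simp only [closeA]
              rw [if_neg (by simp only [List.length_cons]; push_cast; omega), if_neg (by simp only [List.length_cons]; push_cast; omega)]
              apply ih ((oc, 0 + w) :: rest2) total
              refine ⟨by simp, by simp, ?_, ht, ?_⟩
              · simp only [resultsOf]
                rw [if_pos (by omega : (0 : Int) + w ≠ 0), hres]
                simp
              · intro p hp
                rcases List.mem_cons.mp hp with h | h
                · simp [h]; omega
                · exact hr2 p h
        · simp only [resultsOf, ne_eq, hosz, not_false_eq_true, if_pos, List.length_cons,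
            reduceIte, List.cons_append, List.nil_append]
          simp only [closeA, List.length_cons]
          rw [if_pos (by omega)]
          apply ih ((oc, os + w) :: rest2) total
          refine ⟨by simp, by simp, ?_, ht, ?_⟩
          · simp only [resultsOf]
            rw [if_pos (by omega : os + w ≠ 0)]
            push_cast
            simp
          · intro p hp
            rcases List.mem_cons.mp hp with h | h
            · simp [h]; omega
            · exact hr2 p h
  · -- s ≠ 0: the group just closed contains completed children summing to s
    have hspos : 0 < s := lt_of_le_of_ne hs (Ne.symm hsz)
    simp only [ne_eq, hsz, not_false_eq_true, if_pos, List.cons_append, List.nil_append,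
      reduceIte, closeB]
    cases rest with
    | nil =>
        by_cases ht0 : total = 0
        · subst ht0
          simp only [resultsOf, ne_eq, not_true_eq_false, reduceIte, List.length_nil,
            Nat.cast_zero, List.map_nil, closeA]
          rw [if_neg (by omega : ¬ (0 : Int) = 0 + 1),
            if_pos (by omega : (0 : Int) = 0 + 1 - 1)]
          apply ih [] (0 + w * s)
          refine ⟨rfl, by simp, ?_, by positivity, by simp⟩
          simp only [resultsOf]
          rw [if_pos (by positivity : (0 : Int) + w * s ≠ 0)]
          simp [mul_comm]
        · simp only [resultsOf, ne_eq, ht0, not_false_eq_true, if_pos, reduceIte,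
            List.length_nil, Nat.cast_zero, List.map_nil, List.nil_append, closeA]
          rw [if_neg (by omega : ¬ (0 : Int) = 0 + 1),
            if_pos (by omega : (0 : Int) = 0 + 1 - 1)]
          apply ih [] (total + w * s)
          refine ⟨rfl, by simp, ?_, by positivity, by simp⟩
          simp only [resultsOf]
          rw [if_pos (by positivity : total + w * s ≠ 0)]
          simp [mul_comm]
    | cons q rest2 =>
        obtain ⟨oc, os⟩ := q
        have hos : 0 ≤ os := hr (oc, os) (by simp)
        have hr2 : ∀ p ∈ rest2, 0 ≤ p.2 := fun p hp => hr p (by simp [hp])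
        by_cases hosz : os = 0
        · subst hosz
          simp only [resultsOf, ne_eq, not_true_eq_false, reduceIte, List.nil_append]
          cases hres : resultsOf rest2 total with
          | nil =>
              simp only [closeA, List.length_cons]
              push_cast
              rw [if_neg (by omega),
                if_pos (by omega :
                  ((rest2.length : Int) + 1) = ((rest2.length : Int) + 1) + 1 - 1)]
              apply ih ((oc, 0 + w * s) :: rest2) total
              refine ⟨by simp, by simp, ?_, ht, ?_⟩
              · simp only [resultsOf]
                rw [if_pos (by positivity : (0 : Int) + w * s ≠ 0), hres]
                simp [mul_comm]
              · intro p hp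
                rcases List.mem_cons.mp hp with h | h
                · simp [h]; positivity
                · exact hr2 p h
          | cons r rrest =>
              obtain ⟨rv, rd⟩ := r
              have hb := resultsOf_bound rest2 total (rv, rd) (by rw [hres]; simp)
              simp only at hb
              simp only [closeA, List.length_cons]
              push_cast
              rw [if_neg (by omega),
                if_pos (by omega :
                  ((rest2.length : Int) + 1) = ((rest2.length : Int) + 1) + 1 - 1),
                if_neg (by omega)]
              apply ih ((oc, 0 + w * s) :: rest2) total
              refine ⟨by simp, by simp, ?_, ht, ?_⟩
              · simp only [resultsOf]
                rw [if_pos (by positivity : (0 : Int) + w * s ≠ 0), hres]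
                simp [mul_comm]
              · intro p hp
                rcases List.mem_cons.mp hp with h | h
                · simp [h]; positivity
                · exact hr2 p h
        · simp only [resultsOf, ne_eq, hosz, not_false_eq_true, if_pos, List.length_cons,
            reduceIte, List.cons_append, List.nil_append, closeA]
          push_cast
          rw [if_neg (by omega),
            if_pos (by omega :
              ((rest2.length : Int) + 1) = ((rest2.length : Int) + 1) + 1 - 1),
            if_pos (rfl : ((rest2.length : Int) + 1) = (rest2.length : Int) + 1)]
          apply ih ((oc, os + w * s) :: rest2) total
          refine ⟨by simp, by simp, ?_, ht, ?_⟩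
          · simp only [resultsOf]
            rw [if_pos (by positivity : os + w * s ≠ 0)]
            simp [mul_comm]
          · intro p hp
            rcases List.mem_cons.mp hp with h | h
            · simp [h]; positivity
            · exact hr2 p h

theorem main_lemma : ∀ (cs : List Char) (bstack : List (Char × Int)) (total : Int)
    (stack : List Char) (results : List (Int × Int)) (depth : Int),
    InvAB stack results depth bstack total →
    solveA cs stack results depth = solveB cs bstack total := by
  intro cs
  induction cs with
  | nil =>
      intro bstack total stack results depth hInv
      obtain ⟨h1, h2, h3, h4, h5⟩ := hInv
      simp only [solveA, solveB]
      cases bstack with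
      | nil =>
          subst h1 h3
          by_cases ht : total = 0 <;> simp [resultsOf, ht]
      | cons p rest => simp [h1]
  | cons c cs ih =>
      intro bstack total stack results depth hInv
      obtain ⟨h1, h2, h3, h4, h5⟩ := hInv
      by_cases hop : c = '(' ∨ c = '['
      · -- opening bracket: push
        simp only [solveA, solveB, if_pos hop]
        apply ih ((c, 0) :: bstack) total
        refine ⟨by simp [h1], ?_, ?_, h4, ?_⟩
        · simp only [List.length_cons]; push_cast; omega
        · simp [resultsOf, h3]
        · intro p hp
          rcases List.mem_cons.mp hp with h | h
          · simp [h]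
          · exact h5 p h
      · by_cases hcl : c = ')' ∨ c = ']'
        · -- closing bracket
          cases bstack with
          | nil =>
              subst h1
              simp only [solveA, solveB, if_neg hop]
              rw [if_neg (by simp)]
              rcases hcl with rfl | rfl <;> simp
          | cons p rest =>
              obtain ⟨op, s⟩ := p
              subst h1
              have hc : ∃ och w, ((c = ')' ∧ och = '(' ∧ w = (2 : Int)) ∨
                  (c = ']' ∧ och = '[' ∧ w = 3)) := by
                rcases hcl with rfl | rfl
                · exact ⟨'(', 2, Or.inl ⟨rfl, rfl, rfl⟩⟩
                · exact ⟨'[', 3, Or.inr ⟨rfl, rfl, rfl⟩⟩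
              obtain ⟨och, w, hc⟩ := hc
              rw [List.map_cons, solveA_close cs op (rest.map Prod.fst) results depth c och w hc,
                solveB_close cs op s rest total c och w hc]
              by_cases hmatch : op = och
              · rw [if_pos hmatch, if_pos hmatch]
                have hw : 0 < w := by rcases hc with ⟨_, _, rfl⟩ | ⟨_, _, rfl⟩ <;> norm_num
                have hs : 0 ≤ s := h5 (op, s) (by simp)
                have hr : ∀ p ∈ rest, 0 ≤ p.2 := fun p hp => h5 p (by simp [hp])
                have hd : depth - 1 = (rest.length : Int) := by
                  simp only [List.length_cons] at h2; push_cast at h2 ⊢; omega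
                have h3' : results =
                    (if s ≠ 0 then [((s : Int), (rest.length : Int) + 1)] else []) ++
                      resultsOf rest total := by
                  rw [h3]; simp [resultsOf]
                rw [hd, h3']
                exact close_key cs rest total s w hw hs h4 hr ih
              · rw [if_neg hmatch, if_neg hmatch]
        · -- non-bracket char: both return 0
          simp only [solveA, solveB, if_neg hop]
          rw [if_neg (by simp [hcl]), if_neg hcl]

-- ===== VERDICT (by name: the statement is the Claim_ definition above) =====
theorem solution_spec : Claim_equal_solution := by
  intro s _
  unfold Spec_solution solution solution_alt
  exact main_lemma s.toList [] 0 [] [] 0 ⟨rfl, rfl, by simp [resultsOf], le_refl 0, by simp⟩
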